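-- pv_equiv track=rewrite | github.com/neizod/problems | codejam/18/0q/a-saving-the-universe-again.py | make_attack_group
-- ===== SOURCE A (Python) =====
-- def make_attack_group(instructions):
--     ls = [0]
--     for inst in instructions:
--         if inst == 'S':
--             ls[-1] += 1
--         else:
--             ls += [0]
--     return ls
-- ===== SOURCE B (Python) =====
-- def make_attack_group(instructions):
--     # transform-then-split pipeline: canonicalise each instruction, split on the separator
--     s = ''.join('S' if c == 'S' else '|' for c in instructions)
--     return [len(g) for g in s.split('|')]
-- ===== Notes on version B (the rewrite author's own statement) =====
-- stated objective: idiomatic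
-- what changed: Replaces the mutable accumulator loop (increment last bucket / append a new bucket) with a transform-then-split pipeline: canonicalise each instruction to either the shoot marker or a fixed separator, join, split on the separator, and return the fragment lengths.
import Mathlib
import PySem

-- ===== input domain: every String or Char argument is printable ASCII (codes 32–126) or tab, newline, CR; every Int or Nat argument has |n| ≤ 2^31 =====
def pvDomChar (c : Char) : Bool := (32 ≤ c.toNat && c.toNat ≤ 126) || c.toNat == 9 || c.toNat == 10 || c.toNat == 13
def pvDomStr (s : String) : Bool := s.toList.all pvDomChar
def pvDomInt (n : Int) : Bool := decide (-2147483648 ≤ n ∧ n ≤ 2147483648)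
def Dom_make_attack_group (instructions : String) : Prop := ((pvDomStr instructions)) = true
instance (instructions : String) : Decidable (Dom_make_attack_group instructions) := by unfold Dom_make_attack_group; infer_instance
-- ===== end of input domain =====

-- B replaces A's accumulator loop with a canonicalise-join-split pipeline (idiomatic rewrite, same cost).

-- ===== PORT A =====
-- ls[-1] += 1 : in-place increment of the last element (ls is always nonempty here)
def pyIncLast : List Int → List Int
  | [] => []
  | [a] => [a + 1]
  | a :: b :: rest => a :: pyIncLast (b :: rest)

def pyStepA (ls : List Int) (inst : Char) : List Int :=
  if inst == 'S' then pyIncLast ls else ls ++ [0]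

def make_attack_group (instructions : String) : List Int :=
  instructions.toList.foldl pyStepA [0]

-- ===== PORT B =====
def make_attack_group_alt (instructions : String) : List Int :=
  match PySem.Str.split? (PySem.Str.join "" (instructions.toList.map (fun c => if c == 'S' then "S" else "|"))) "|" with
  | some gs => gs.map (fun g => PySem.Str.len g)
  | none => []   -- unreachable: the separator "|" is nonempty

-- ===== PRECONDITION & SPEC =====
def Spec_make_attack_group (instructions : String) (out : List Int) : Prop := out = make_attack_group_alt instructions
instance (instructions : String) (out : List Int) : Decidable (Spec_make_attack_group instructions out) := by unfold Spec_make_attack_group; infer_instance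

-- ===== CLAIM (what is proved, stated in full; the proofs are below) =====
def Claim_equal_make_attack_group : Prop := ∀ (instructions : String), Dom_make_attack_group instructions → Spec_make_attack_group instructions (make_attack_group instructions)

-- ===== LEMMAS AND PROOFS =====

-- common specification: group sizes by structural recursion on the instruction list
def grp : List Char → List Int
  | [] => [0]
  | c :: cs =>
    if c = 'S' then
      match grp cs with
      | [] => []
      | h :: t => (h + 1) :: t
    else 0 :: grp cs

theorem grp_ne_nil (cs : List Char) : grp cs ≠ [] := by
  induction cs with
  | nil => simp [grp]
  | cons c cs ih =>
    cases h : grp cs with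
    | nil => exact absurd h ih
    | cons g gs => by_cases hc : c = 'S' <;> simp [grp, hc, h]

-- ===== A-side =====
theorem pyIncLast_ne_nil (l : List Int) (h : l ≠ []) : pyIncLast l ≠ [] := by
  cases l with
  | nil => exact absurd rfl h
  | cons a l' => cases l' <;> simp [pyIncLast]

theorem pyIncLast_append (pre l : List Int) (h : l ≠ []) :
    pyIncLast (pre ++ l) = pre ++ pyIncLast l := by
  induction pre with
  | nil => simp
  | cons a pre ih =>
    cases pre with
    | nil => cases l with
      | nil => exact absurd rfl h
      | cons x xs => simp [pyIncLast]
    | cons b pre' =>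
      simpa [pyIncLast] using ih

theorem pyStepA_ne_nil (l : List Int) (c : Char) (h : l ≠ []) : pyStepA l c ≠ [] := by
  by_cases hc : c == 'S'
  · simpa [pyStepA, hc] using pyIncLast_ne_nil l h
  · simp [pyStepA, hc]

theorem foldlA_ne_nil (cs : List Char) (l : List Int) (h : l ≠ []) :
    List.foldl pyStepA l cs ≠ [] := by
  induction cs generalizing l with
  | nil => simpa
  | cons c cs ih =>
    simp only [List.foldl_cons]
    exact ih _ (pyStepA_ne_nil l c h)

theorem foldlA_append (cs : List Char) (pre l : List Int) (h : l ≠ []) :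
    List.foldl pyStepA (pre ++ l) cs = pre ++ List.foldl pyStepA l cs := by
  induction cs generalizing l with
  | nil => simp
  | cons c cs ih =>
    simp only [List.foldl_cons]
    by_cases hc : c == 'S'
    · rw [pyStepA, if_pos hc, pyIncLast_append pre l h, pyStepA, if_pos hc]
      exact ih _ (pyIncLast_ne_nil l h)
    · rw [pyStepA, if_neg hc, pyStepA, if_neg hc, List.append_assoc]
      exact ih (l ++ [0]) (by simp)

theorem foldlA_single (cs : List Char) (a : Int) :
    List.foldl pyStepA [a] cs =
      match List.foldl pyStepA [0] cs with
      | [] => []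
      | h :: t => (a + h) :: t := by
  induction cs generalizing a with
  | nil => simp
  | cons c cs ih =>
    simp only [List.foldl_cons]
    by_cases hc : c == 'S'
    · have e1 : pyStepA [a] c = [a + 1] := by simp [pyStepA, hc, pyIncLast]
      have e0 : pyStepA [0] c = [(0 : Int) + 1] := by simp [pyStepA, hc, pyIncLast]
      rw [e1, e0, ih (a + 1), ih ((0 : Int) + 1)]
      cases h0 : List.foldl pyStepA [0] cs with
      | nil => exact absurd h0 (foldlA_ne_nil cs [0] (by simp))
      | cons h t => simp; omega
    · have e1 : pyStepA [a] c = [a] ++ [0] := by simp [pyStepA, hc]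
      have e0 : pyStepA [0] c = [(0 : Int)] ++ [0] := by simp [pyStepA, hc]
      rw [e1, e0, foldlA_append cs [a] [0] (by simp), foldlA_append cs [0] [0] (by simp)]
      cases List.foldl pyStepA [0] cs <;> simp

theorem A_eq_grp (cs : List Char) : List.foldl pyStepA [0] cs = grp cs := by
  induction cs with
  | nil => rfl
  | cons c cs ih =>
    simp only [List.foldl_cons]
    by_cases hc : c == 'S'
    · have hc' : c = 'S' := by simpa using hc
      have e0 : pyStepA [0] c = [(0 : Int) + 1] := by simp [pyStepA, hc, pyIncLast]
      rw [e0, foldlA_single cs ((0 : Int) + 1), ih]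
      cases h0 : grp cs with
      | nil => exact absurd h0 (grp_ne_nil cs)
      | cons h t => simp [grp, hc', h0]; omega
    · have hc' : ¬ c = 'S' := by simpa using hc
      have e0 : pyStepA [0] c = [(0 : Int)] ++ [0] := by simp [pyStepA, hc]
      rw [e0, foldlA_append cs [0] [0] (by simp), ih]
      simp [grp, hc']

-- ===== B-side =====
-- split on '|' as a clean structural recursion
def segs : List Char → List (List Char)
  | [] => [[]]
  | c :: rest =>
    if c = '|' then [] :: segs rest
    else
      match segs rest with
      | [] => []
      | g :: gs => (c :: g) :: gs

theorem segs_ne_nil (cs : List Char) : segs cs ≠ [] := by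
  induction cs with
  | nil => simp [segs]
  | cons c cs ih =>
    cases h : segs cs with
    | nil => exact absurd h ih
    | cons g gs => by_cases hc : c = '|' <;> simp [segs, hc, h]

theorem splitOn_go_eq (fuel : Nat) (l cur : List Char) (acc : List (List Char))
    (h : l.length < fuel) :
    PySem.Chars.splitOn.go ['|'] fuel l cur acc =
      acc.reverse ++
        (match segs l with
         | [] => []
         | g :: gs => (cur.reverse ++ g) :: gs) := by
  induction fuel generalizing l cur acc with
  | zero => omega
  | succ f ih =>
    cases l with
    | nil => simp [PySem.Chars.splitOn.go, segs]
    | cons c rest =>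
      have hlen : rest.length < f := by simp at h; omega
      by_cases hc : c = '|'
      · subst hc
        have hpre : (['|'] : List Char).isPrefixOf ('|' :: rest) = true := by
          simp [List.isPrefixOf]
        rw [PySem.Chars.splitOn.go]
        simp only [hpre, if_pos, List.length_singleton, List.drop_succ_cons, List.drop_zero]
        rw [ih rest [] (cur.reverse :: acc) hlen]
        cases hs : segs rest with
        | nil => exact absurd hs (segs_ne_nil rest)
        | cons g gs => simp [segs, hs]
      · have hpre : (['|'] : List Char).isPrefixOf (c :: rest) = false := by
          simp [List.isPrefixOf]
          exact fun hh => hc hh.symm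
        rw [PySem.Chars.splitOn.go]
        simp only [hpre, Bool.false_eq_true, if_neg, not_false_iff]
        rw [ih rest (c :: cur) acc hlen]
        cases hs : segs rest with
        | nil => exact absurd hs (segs_ne_nil rest)
        | cons g gs => simp [segs, hc, hs]

theorem splitOn_eq_segs (l : List Char) : PySem.Chars.splitOn l ['|'] = segs l := by
  rw [PySem.Chars.splitOn, splitOn_go_eq (l.length + 1) l [] [] (by omega)]
  cases hs : segs l with
  | nil => exact absurd hs (segs_ne_nil l)
  | cons g gs => simp

def canon (cs : List Char) : List Char := cs.map (fun c => if c = 'S' then 'S' else '|')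

theorem segs_canon_eq_grp (cs : List Char) :
    (segs (canon cs)).map (fun g => (g.length : Int)) = grp cs := by
  induction cs with
  | nil => simp [canon, segs, grp]
  | cons c cs ih =>
    by_cases hc : c = 'S'
    · have hcanon : canon (c :: cs) = 'S' :: canon cs := by simp [canon, hc]
      rw [hcanon]
      rw [show segs ('S' :: canon cs)
            = match segs (canon cs) with
              | [] => []
              | g :: gs => ('S' :: g) :: gs from by simp [segs]]
      cases hs : segs (canon cs) with
      | nil => exact absurd hs (segs_ne_nil _)
      | cons g gs =>
        have hgrp : grp cs = (g.length : Int) :: gs.map (fun g => (g.length : Int)) := by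
          rw [← ih, hs]; rfl
        simp [grp, hc, hgrp]
    · have hcanon : canon (c :: cs) = '|' :: canon cs := by simp [canon, hc]
      rw [hcanon]
      rw [show segs ('|' :: canon cs) = [] :: segs (canon cs) from by simp [segs]]
      simp [grp, hc, ← ih]

-- ===== final assembly =====
theorem alt_eq_grp (instructions : String) :
    make_attack_group_alt instructions = grp instructions.toList := by
  unfold make_attack_group_alt
  have hjoin : (PySem.Str.join "" (instructions.toList.map (fun c => if c == 'S' then "S" else "|"))).toList
      = canon instructions.toList := by
    rw [PySem.Str.toList_join]
    have hmap : (instructions.toList.map (fun c => if c == 'S' then "S" else "|")).map String.toList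
        = (canon instructions.toList).map (fun c => [c]) := by
      simp only [List.map_map, canon]
      apply List.map_congr_left
      intro c _
      by_cases hc : c = 'S' <;> simp [hc]
    rw [hmap]
    simpa using PySem.Chars.join_nil_singletons (canon instructions.toList)
  have hsplit := PySem.Str.split?_map
    (PySem.Str.join "" (instructions.toList.map (fun c => if c == 'S' then "S" else "|"))) "|"
  rw [hjoin] at hsplit
  rw [show ("|" : String).toList = ['|'] from rfl] at hsplit
  rw [PySem.Chars.split?] at hsplit
  simp only [List.isEmpty_cons, Bool.false_eq_true, if_neg, not_false_iff] at hsplit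
  cases hq : PySem.Str.split?
      (PySem.Str.join "" (instructions.toList.map (fun c => if c == 'S' then "S" else "|"))) "|" with
  | none => rw [hq] at hsplit; simp at hsplit
  | some gs =>
    rw [hq] at hsplit
    simp only [Option.map_some, Option.some.injEq] at hsplit
    simp only []
    have hlen : gs.map (fun g => PySem.Str.len g)
        = (gs.map String.toList).map (fun g => (g.length : Int)) := by
      simp [PySem.Str.len]
    rw [hlen, hsplit, splitOn_eq_segs, segs_canon_eq_grp]

-- ===== VERDICT (by name: the statement is the Claim_ definition above) =====
theorem make_attack_group_spec : Claim_equal_make_attack_group := by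
  intro instructions _
  unfold Spec_make_attack_group make_attack_group
  rw [alt_eq_grp, A_eq_grp]
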